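-- pv_equiv track=rewrite | github.com/meyersbs/SPLAT | splat_src/splat_functions.py | new_yngve
-- ===== SOURCE A (Python) =====
-- def new_yngve(treestring):
-- 	just_pushed = False
-- 	stack = 0
-- 	total = 0
-- 	for char in treestring:
-- 		if char == "(":
-- 			just_pushed = True
-- 			stack += 1
-- 		elif char == ")":
-- 			if just_pushed:
-- 				total += stack
-- 			just_pushed = False
-- 			stack -= 1
--
-- 	return total
-- ===== SOURCE B (Python) =====
-- def new_yngve(treestring):
--     # Filter to paren characters, build a prefix-depth table, then sum depths at leaf sites.
--     ps = [c for c in treestring if c in "()"]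
--     depth = [0]
--     for c in ps:
--         depth.append(depth[-1] + (1 if c == "(" else -1))
--     total = 0
--     for i in range(len(ps) - 1):
--         if ps[i] == "(" and ps[i + 1] == ")":
--             total += depth[i] + 1
--     return total
-- ===== Notes on version B (the rewrite author's own statement) =====
-- stated objective: alternative
-- what changed: Replaced A's single flag-tracking pass with a three-stage decomposition: filter the string to its paren characters, build a prefix-depth table, then scan the filtered sequence for leaf sites (an open paren immediately followed by a close paren) and sum the table depths there.
import Mathlib
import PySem

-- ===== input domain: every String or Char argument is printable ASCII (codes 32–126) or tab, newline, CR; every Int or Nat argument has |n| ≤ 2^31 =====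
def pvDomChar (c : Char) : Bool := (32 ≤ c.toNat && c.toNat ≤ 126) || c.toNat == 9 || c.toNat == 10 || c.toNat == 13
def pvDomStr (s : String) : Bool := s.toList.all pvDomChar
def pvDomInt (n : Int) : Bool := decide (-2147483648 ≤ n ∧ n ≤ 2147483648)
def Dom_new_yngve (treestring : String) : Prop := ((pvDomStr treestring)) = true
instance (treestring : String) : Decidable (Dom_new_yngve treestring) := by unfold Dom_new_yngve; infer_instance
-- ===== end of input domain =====

-- B filters to parentheses, builds a prefix-depth table, then sums depths at leaf sites:
-- a table-then-locate decomposition instead of A's single flag-tracking pass (alternative, same cost).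

-- ===== PORT A =====
-- state = (just_pushed, stack, total)
def pvStepA (st : Bool × Int × Int) (c : Char) : Bool × Int × Int :=
  if c = '(' then (true, st.2.1 + 1, st.2.2)
  else if c = ')' then (false, st.2.1 - 1, st.2.2 + if st.1 then st.2.1 else 0)
  else st

def new_yngve (treestring : String) : Int :=
  (treestring.toList.foldl pvStepA (false, 0, 0)).2.2

-- ===== PORT B =====
def pvIsParen (c : Char) : Bool := c == '(' || c == ')'

def pvDelta (c : Char) : Int := if c == '(' then 1 else -1

def new_yngve_alt (treestring : String) : Int :=
  let ps := treestring.toList.filter pvIsParen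
  -- depth[-1] is always defined (the list starts as [0]); getLastD 0 is exact here
  let depth := ps.foldl (fun acc c => acc ++ [acc.getLastD 0 + pvDelta c]) [0]
  (PySem.List.pyRange 0 ((ps.length : Int) - 1) 1).foldl
    (fun tot i =>
      if PySem.List.pyGet? ps i == some '(' && PySem.List.pyGet? ps (i + 1) == some ')' then
        tot + PySem.List.pyGetD depth i 0 + 1
      else tot) 0

-- ===== PRECONDITION & SPEC =====
def Spec_new_yngve (treestring : String) (out : Int) : Prop := out = new_yngve_alt treestring
instance (treestring : String) (out : Int) : Decidable (Spec_new_yngve treestring out) := by unfold Spec_new_yngve; infer_instance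

-- ===== CLAIM (what is proved, stated in full; the proofs are below) =====
def Claim_equal_new_yngve : Prop := ∀ (treestring : String), Dom_new_yngve treestring → Spec_new_yngve treestring (new_yngve treestring)

-- ===== LEMMAS AND PROOFS =====

-- prefix-depth table of a paren list, starting at depth d (length l.length + 1)
def pvPre (d : Int) : List Char → List Int
  | [] => [d]
  | c :: r => d :: pvPre (d + pvDelta c) r

-- reference value: sum of (depth inside) over leaf sites, starting at depth d
def pvG (d : Int) : List Char → Int
  | [] => 0
  | c :: r =>
    if c = '(' then (if r.head? = some ')' then d + 1 else 0) + pvG (d + 1) r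
    else pvG (d - 1) r

-- A's step ignores non-paren characters
theorem pvStepA_skip (st : Bool × Int × Int) (c : Char) (h : pvIsParen c = false) :
    pvStepA st c = st := by
  simp [pvIsParen] at h
  simp [pvStepA, h.1, h.2]

theorem foldl_stepA_filter (l : List Char) (st : Bool × Int × Int) :
    l.foldl pvStepA st = (l.filter pvIsParen).foldl pvStepA st := by
  induction l generalizing st with
  | nil => rfl
  | cons c r ih =>
    by_cases h : pvIsParen c = true
    · simp [h, List.foldl_cons, ih]
    · simp only [Bool.not_eq_true] at h
      simp [h, List.foldl_cons, pvStepA_skip st c h, ih]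

-- characterization of A's fold on a paren-only list, both flag values at once
theorem foldl_stepA_eq_pvG (l : List Char) (hl : ∀ c ∈ l, pvIsParen c = true) :
    ∀ s tot : Int,
      ((l.foldl pvStepA (true, s, tot)).2.2
        = tot + (if l.head? = some ')' then s else 0) + pvG s l)
      ∧ ((l.foldl pvStepA (false, s, tot)).2.2 = tot + pvG s l) := by
  induction l with
  | nil => intro s tot; simp [pvG]
  | cons c r ih =>
    intro s tot
    have hc := hl c (List.mem_cons_self ..)
    have hr : ∀ c ∈ r, pvIsParen c = true := fun x hx => hl x (List.mem_cons_of_mem _ hx)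
    simp [pvIsParen] at hc
    rcases hc with hc | hc
    · -- c = '('
      subst hc
      constructor
      · show ((r.foldl pvStepA (true, s + 1, tot)).2.2 = _)
        rw [(ih hr (s + 1) tot).1]
        simp [pvG] <;> ring
      · show ((r.foldl pvStepA (true, s + 1, tot)).2.2 = _)
        rw [(ih hr (s + 1) tot).1]
        simp [pvG] <;> ring
    · -- c = ')'
      subst hc
      constructor
      · show ((r.foldl pvStepA (false, s - 1, tot + s)).2.2 = _)
        rw [(ih hr (s - 1) (tot + s)).2]
        simp [pvG] <;> ring
      · show ((r.foldl pvStepA (false, s - 1, tot + 0)).2.2 = _)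
        rw [(ih hr (s - 1) (tot + 0)).2]
        simp [pvG] <;> ring

-- B's depth-building fold produces the prefix-depth table
theorem foldl_depth_eq_pvPre (l : List Char) :
    ∀ (xs : List Int) (d : Int),
      l.foldl (fun acc c => acc ++ [acc.getLastD 0 + pvDelta c]) (xs ++ [d]) = xs ++ pvPre d l := by
  induction l with
  | nil => intro xs d; simp [pvPre]
  | cons c r ih =>
    intro xs d
    have hlast : (xs ++ [d]).getLastD 0 = d := by simp
    simp only [List.foldl_cons, hlast]
    have : (xs ++ [d]) ++ [d + pvDelta c] = (xs ++ [d]) ++ [d + pvDelta c] := rfl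
    rw [show (xs ++ [d]) ++ [d + pvDelta c] = (xs ++ [d]) ++ [d + pvDelta c] from rfl,
        ih (xs ++ [d]) (d + pvDelta c)]
    simp [pvPre]

-- Finset-sum form of B's index scan
def pvTerm (l : List Char) (d : Int) (k : Nat) : Int :=
  if l[k]? == some '(' && l[k + 1]? == some ')' then (pvPre d l).getD k 0 + 1 else 0

theorem sum_pvTerm_eq_pvG (l : List Char) :
    ∀ d : Int, (∑ k ∈ Finset.range (l.length - 1), pvTerm l d k) = pvG d l := by
  induction l with
  | nil => intro d; simp [pvG]
  | cons c r ih =>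
    intro d
    cases r with
    | nil =>
      by_cases hc : c = '(' <;> simp [pvG, hc]
    | cons c2 r2 =>
      have hlen : (c :: c2 :: r2).length - 1 = (c2 :: r2).length := by simp
      rw [hlen]
      have hlen2 : (c2 :: r2).length = ((c2 :: r2).length - 1) + 1 := by simp
      rw [hlen2, Finset.sum_range_succ']
      have hshift : ∀ k : Nat, pvTerm (c :: c2 :: r2) d (k + 1) = pvTerm (c2 :: r2) (d + pvDelta c) k := by
        intro k
        simp [pvTerm, pvPre]
      have h0 : pvTerm (c :: c2 :: r2) d 0
          = if c = '(' ∧ c2 = ')' then d + 1 else 0 := by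
        simp only [pvTerm, pvPre]
        by_cases hc : c = '(' <;> by_cases hc2 : c2 = ')' <;> simp [hc, hc2]
      rw [Finset.sum_congr rfl (fun k _ => hshift k), ih (d + pvDelta c), h0]
      by_cases hc : c = '('
      · by_cases hc2 : c2 = ')' <;> simp [pvG, pvDelta, hc, hc2] <;> ring
      · have hd : d + pvDelta c = d - 1 := by simp [pvDelta, hc]; ring
        rw [hd]
        simp [pvG, hc]

theorem pv_sum_map_range (f : Nat → Int) (n : Nat) :
    ((List.range n).map f).sum = ∑ k ∈ Finset.range n, f k := by
  induction n with
  | zero => simp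
  | succ m ih => rw [List.range_succ, Finset.sum_range_succ, List.map_append, List.sum_append, ih]; simp

-- B's index fold equals the Finset sum
theorem foldl_idx_eq_sum (ps : List Char) (depth : List Int) (hd : depth = pvPre 0 ps) :
    (PySem.List.pyRange 0 ((ps.length : Int) - 1) 1).foldl
      (fun tot i =>
        if PySem.List.pyGet? ps i == some '(' && PySem.List.pyGet? ps (i + 1) == some ')' then
          tot + PySem.List.pyGetD depth i 0 + 1
        else tot) 0
      = ∑ k ∈ Finset.range (ps.length - 1), pvTerm ps 0 k := by
  subst hd
  rw [PySem.List.pyRange_one, List.foldl_map]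
  have hcast : ((ps.length : Int) - 1 - 0).toNat = ps.length - 1 := by omega
  rw [hcast]
  have hbody : ∀ (tot : Int) (k : Nat),
      (if (PySem.List.pyGet? ps (0 + (k : Int)) == some '(' &&
            PySem.List.pyGet? ps (0 + (k : Int) + 1) == some ')') = true then
        tot + PySem.List.pyGetD (pvPre 0 ps) (0 + (k : Int)) 0 + 1
      else tot) = tot + pvTerm ps 0 k := by
    intro tot k
    have h1 : (0 : Int) + (k : Int) = ((k : Nat) : Int) := by omega
    rw [h1]
    have h2 : ((k : Nat) : Int) + 1 = (((k + 1 : Nat)) : Int) := by push_cast; ring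
    rw [h2]
    simp only [PySem.List.pyGet?_natCast, PySem.List.pyGetD_natCast, pvTerm]
    by_cases h : (ps[k]? == some '(' && ps[k + 1]? == some ')') = true
    · simp [h]
      ring
    · simp only [Bool.not_eq_true] at h
      simp [h]
  have this : ∀ (init : Int) (L : List Nat),
      L.foldl (fun (tot : Int) (k : Nat) =>
        if PySem.List.pyGet? ps (0 + (k : Int)) == some '(' &&
            PySem.List.pyGet? ps ((0 + (k : Int)) + 1) == some ')' then
          tot + PySem.List.pyGetD (pvPre 0 ps) (0 + (k : Int)) 0 + 1
        else tot) init = init + (L.map (pvTerm ps 0)).sum := by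
    intro init L
    induction L generalizing init with
    | nil => simp
    | cons a L ihL =>
      simp only [List.foldl_cons, List.map_cons, List.sum_cons]
      rw [hbody init a, ihL]
      ring
  rw [this 0 (List.range (ps.length - 1))]
  rw [pv_sum_map_range (pvTerm ps 0) (ps.length - 1)]
  ring

-- ===== VERDICT (by name: the statement is the Claim_ definition above) =====
theorem new_yngve_spec : Claim_equal_new_yngve := by
  intro t _
  unfold Spec_new_yngve new_yngve new_yngve_alt
  set ps := t.toList.filter pvIsParen with hps
  have hmem : ∀ c ∈ ps, pvIsParen c = true := by
    intro c hc; exact (List.mem_filter.mp (hps ▸ hc)).2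
  rw [foldl_stepA_filter, ← hps, (foldl_stepA_eq_pvG ps hmem 0 0).2]
  have hdepth : ps.foldl (fun acc c => acc ++ [acc.getLastD 0 + pvDelta c]) [0] = pvPre 0 ps := by
    have := foldl_depth_eq_pvPre ps [] 0
    simpa using this
  simp only [hdepth]
  rw [foldl_idx_eq_sum ps (pvPre 0 ps) rfl, sum_pvTerm_eq_pvG ps 0]
  simp
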